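-- pv_equiv track=rewrite | github.com/miliar/Code_Jam_Webscraper | solutions_python/Problem_155/3074.py | solve
-- ===== SOURCE A (Python) =====
-- def solve(s_levels):
--   applauding = 0
--   friends = 0
--   for level, count in enumerate(s_levels):
--     if level > applauding:
--       new_friends = level - applauding
--       friends += new_friends
--       applauding += new_friends
--     applauding += count
--   return friends
-- ===== SOURCE B (Python) =====
-- def solve(s_levels):
--   # Right-to-left pass: m is the answer for the suffix starting at the next
--   # position; each element either absorbs the need ((1 - c) + m) or the
--   # position itself applauds for free (clamp at 0).
--   m = 0
--   for c in reversed(s_levels[:-1]):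
--     m = max(0, (1 - c) + m)
--   return m
-- ===== Notes on version B (the rewrite author's own statement) =====
-- stated objective: alternative
-- what changed: Replaces A's left-to-right scan with applauding/friends state by a right-to-left pass over s_levels[:-1] maintaining the suffix answer via the recurrence m = max(0, (1 - c) + m): each position's need is pushed leftward and clamped at zero, with no enumerate, no prefix sum and no friends counter.
import Mathlib
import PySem

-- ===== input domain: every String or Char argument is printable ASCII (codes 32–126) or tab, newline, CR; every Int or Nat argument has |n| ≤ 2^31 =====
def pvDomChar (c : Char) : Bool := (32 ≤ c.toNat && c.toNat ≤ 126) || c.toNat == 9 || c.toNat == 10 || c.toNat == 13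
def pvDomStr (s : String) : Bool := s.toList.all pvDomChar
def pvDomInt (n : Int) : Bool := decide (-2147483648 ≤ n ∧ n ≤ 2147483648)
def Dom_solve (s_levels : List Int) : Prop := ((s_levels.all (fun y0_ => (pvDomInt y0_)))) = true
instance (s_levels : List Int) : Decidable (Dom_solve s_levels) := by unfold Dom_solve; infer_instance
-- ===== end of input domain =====

-- B computes the answer back-to-front with the clamped suffix recurrence m = max 0 ((1-c)+m); alternative decomposition, same cost.


-- ===== PORT A =====
-- loop over enumerate(s_levels) carrying (level, applauding, friends), branch as in A
def solveGo : List Int → Int → Int → Int → Int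
  | [], _, _, friends => friends
  | count :: rest, level, applauding, friends =>
    if level > applauding then
      solveGo rest (level + 1) ((applauding + (level - applauding)) + count)
        (friends + (level - applauding))
    else
      solveGo rest (level + 1) (applauding + count) friends

def solve (s_levels : List Int) : Int := solveGo s_levels 0 0 0

-- ===== PORT B =====
-- s_levels[:-1] = dropLast (exact for every list), reversed = List.reverse,
-- the loop body is the fold step m ↦ max 0 ((1 - c) + m) starting from 0
def solve_alt (s_levels : List Int) : Int :=
  (s_levels.dropLast.reverse).foldl (fun m c => max 0 ((1 - c) + m)) 0

-- ===== PRECONDITION & SPEC =====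
def Spec_solve (s_levels : List Int) (out : Int) : Prop := out = solve_alt s_levels
instance (s_levels : List Int) (out : Int) : Decidable (Spec_solve s_levels out) := by unfold Spec_solve; infer_instance

-- ===== CLAIM (what is proved, stated in full; the proofs are below) =====
def Claim_equal_solve : Prop := ∀ (s_levels : List Int), Dom_solve s_levels → Spec_solve s_levels (solve s_levels)

-- ===== LEMMAS AND PROOFS =====
-- B's fold never goes below 0
theorem solve_alt_nonneg_aux (L : List Int) : ∀ m : Int, 0 ≤ m →
    0 ≤ L.foldl (fun m c => max 0 ((1 - c) + m)) m := by
  induction L with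
  | nil => intro m h; simpa using h
  | cons c rest ih =>
    intro m h
    exact ih _ (le_max_left _ _)

theorem solve_alt_nonneg (l : List Int) : 0 ≤ solve_alt l :=
  solve_alt_nonneg_aux _ 0 le_rfl

-- unfolding B's fold one step on a list of length ≥ 2
theorem solve_alt_cons (c c2 : Int) (rest2 : List Int) :
    solve_alt (c :: c2 :: rest2) = max 0 ((1 - c) + solve_alt (c2 :: rest2)) := by
  simp [solve_alt, List.dropLast_cons₂, List.foldl_append]

-- invariant of A's loop in terms of B's suffix answer
theorem solveGo_eq (l : List Int) : l ≠ [] → ∀ i a f : Int,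
    solveGo l i a f = f + max 0 ((i - a) + solve_alt l) := by
  induction l with
  | nil => intro h; exact absurd rfl h
  | cons c rest ih =>
    intro _ i a f
    cases rest with
    | nil =>
      have hB : solve_alt [c] = 0 := rfl
      simp only [solveGo, hB]
      split_ifs with h <;> omega
    | cons c2 rest2 =>
      have hB := solve_alt_cons c c2 rest2
      have hnn := solve_alt_nonneg (c2 :: rest2)
      have step : solveGo (c :: c2 :: rest2) i a f =
          if i > a then
            solveGo (c2 :: rest2) (i + 1) ((a + (i - a)) + c) (f + (i - a))
          else solveGo (c2 :: rest2) (i + 1) (a + c) f := rfl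
      rw [step]
      split_ifs with h
      · rw [ih (by simp) (i + 1) ((a + (i - a)) + c) (f + (i - a)), hB]
        omega
      · rw [ih (by simp) (i + 1) (a + c) f, hB]
        omega

-- ===== VERDICT (by name: the statement is the Claim_ definition above) =====
theorem solve_spec : Claim_equal_solve := by
  intro l _
  show solve l = solve_alt l
  cases l with
  | nil => rfl
  | cons c rest =>
    have hnn := solve_alt_nonneg (c :: rest)
    rw [solve, solveGo_eq (c :: rest) (by simp) 0 0 0]
    omega
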